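-- pv_equiv track=rewrite | github.com/bencipher/for_epam | epam_test.py | solution_unoptimized
-- ===== SOURCE A (Python) =====
-- def solution_unoptimized(A):
--     N = len(A)
--     result = 0
--     for i in range(N):
--         for j in range(i, N):
--             if A[i] != A[j]:
--                 result = max(result, j - i)
--     return result
-- ===== SOURCE B (Python) =====
-- def solution_unoptimized(A):
--     # O(N): any differing pair (i, j) is dominated by a pair anchored at an
--     # endpoint: if A[j] != A[0] the pair (0, j) is at least as far apart; if
--     # A[i] != A[-1] the pair (i, N-1) is; otherwise A[0] != A[-1] spans it all.
--     if not A: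
--         return 0
--     n = len(A)
--     first, last = A[0], A[n - 1]
--     d1 = 0
--     d2 = 0
--     for j in range(n):
--         if A[j] != first:
--             d1 = max(d1, j)
--         if A[j] != last:
--             d2 = max(d2, n - 1 - j)
--     return max(d1, d2)
-- ===== Notes on version B (the rewrite author's own statement) =====
-- stated objective: faster
-- what changed: Replaced the all-pairs double loop by a single linear pass anchoring pairs at the two endpoints (farthest element differing from A[0], and from A[-1]).
import Mathlib
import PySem

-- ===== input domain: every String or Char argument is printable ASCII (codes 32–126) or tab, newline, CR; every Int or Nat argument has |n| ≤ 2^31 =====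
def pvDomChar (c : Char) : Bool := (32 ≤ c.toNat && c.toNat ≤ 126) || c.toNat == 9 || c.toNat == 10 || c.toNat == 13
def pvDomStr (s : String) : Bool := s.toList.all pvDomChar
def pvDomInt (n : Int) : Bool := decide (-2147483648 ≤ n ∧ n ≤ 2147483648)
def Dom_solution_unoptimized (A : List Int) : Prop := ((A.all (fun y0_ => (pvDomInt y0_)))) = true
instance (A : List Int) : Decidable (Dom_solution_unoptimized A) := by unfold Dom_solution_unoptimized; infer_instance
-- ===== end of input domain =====

-- B replaces A's O(n^2) all-pairs scan by one linear pass anchored at the two endpoints (faster, asymptotic).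


-- ===== PORT A =====
def solution_unoptimized (A : List Int) : Int :=
  let N : Int := A.length
  (PySem.List.pyRange 0 N 1).foldl (fun result i =>
    (PySem.List.pyRange i N 1).foldl (fun result j =>
      if PySem.List.pyGetD A i 0 ≠ PySem.List.pyGetD A j 0 then max result (j - i) else result)
      result) 0

-- ===== PORT B =====
def solution_unoptimized_alt (A : List Int) : Int :=
  if A = [] then 0
  else
    let n : Int := A.length
    let first := PySem.List.pyGetD A 0 0
    let last := PySem.List.pyGetD A (n - 1) 0
    let d := (PySem.List.pyRange 0 n 1).foldl (fun d j =>
      (if PySem.List.pyGetD A j 0 ≠ first then max d.1 j else d.1,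
       if PySem.List.pyGetD A j 0 ≠ last then max d.2 (n - 1 - j) else d.2)) (0, 0)
    max d.1 d.2

-- ===== PRECONDITION & SPEC =====
def Spec_solution_unoptimized (A : List Int) (out : Int) : Prop := out = solution_unoptimized_alt A
instance (A : List Int) (out : Int) : Decidable (Spec_solution_unoptimized A out) := by unfold Spec_solution_unoptimized; infer_instance

-- ===== CLAIM (what is proved, stated in full; the proofs are below) =====
def Claim_equal_solution_unoptimized : Prop := ∀ (A : List Int), Dom_solution_unoptimized A → Spec_solution_unoptimized A (solution_unoptimized A)

-- ===== LEMMAS AND PROOFS =====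

/-- conditional running maximum, the common loop shape of both ports -/
def fmax (p : Int → Prop) [DecidablePred p] (g : Int → Int) (l : List Int) (a : Int) : Int :=
  l.foldl (fun acc x => if p x then max acc (g x) else acc) a

theorem le_fmax (p : Int → Prop) [DecidablePred p] (g : Int → Int) (l : List Int) (a : Int) :
    a ≤ fmax p g l a := by
  induction l generalizing a with
  | nil => simp [fmax]
  | cons x xs ih =>
    simp only [fmax, List.foldl_cons]
    split
    · exact le_trans (le_max_left _ _) (ih _)
    · exact ih a

theorem fmax_ge {p : Int → Prop} [DecidablePred p] {g : Int → Int} {l : List Int} {a x : Int}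
    (hx : x ∈ l) (hp : p x) : g x ≤ fmax p g l a := by
  induction l generalizing a with
  | nil => cases hx
  | cons y ys ih =>
    simp only [fmax, List.foldl_cons]
    rcases List.mem_cons.mp hx with rfl | hx'
    · rw [if_pos hp]
      exact le_trans (le_max_right _ _) (le_fmax p g ys _)
    · exact ih hx'

theorem fmax_cases (p : Int → Prop) [DecidablePred p] (g : Int → Int) (l : List Int) (a : Int) :
    fmax p g l a = a ∨ ∃ x ∈ l, p x ∧ fmax p g l a = g x := by
  induction l generalizing a with
  | nil => left; rfl
  | cons y ys ih =>
    simp only [fmax, List.foldl_cons]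
    by_cases hy : p y
    · rw [if_pos hy]
      rcases ih (max a (g y)) with h | ⟨x, hx, hpx, hval⟩
      · rcases max_choice a (g y) with hm | hm
        · left; rw [fmax] at h; rw [h, hm]
        · right; exact ⟨y, List.mem_cons_self, hy, by rw [fmax] at h; rw [h, hm]⟩
      · right; exact ⟨x, List.mem_cons_of_mem _ hx, hpx, hval⟩
    · rw [if_neg hy]
      rcases ih a with h | ⟨x, hx, hpx, hval⟩
      · left; exact h
      · right; exact ⟨x, List.mem_cons_of_mem _ hx, hpx, hval⟩

/-- nested loop shape of port A: each outer step is itself an `fmax` -/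
theorem le_foldl_fmax (q : Int → Int → Prop) [∀ i, DecidablePred (q i)]
    (h : Int → Int → Int) (inner : Int → List Int) (l : List Int) (a : Int) :
    a ≤ l.foldl (fun acc i => fmax (q i) (h i) (inner i) acc) a := by
  induction l generalizing a with
  | nil => simp
  | cons y ys ih => exact le_trans (le_fmax _ _ _ _) (ih _)

theorem foldl_fmax_ge {q : Int → Int → Prop} [∀ i, DecidablePred (q i)]
    {h : Int → Int → Int} {inner : Int → List Int} {l : List Int} {a i x : Int}
    (hi : i ∈ l) (hx : x ∈ inner i) (hq : q i x) :
    h i x ≤ l.foldl (fun acc i => fmax (q i) (h i) (inner i) acc) a := by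
  induction l generalizing a with
  | nil => cases hi
  | cons y ys ih =>
    simp only [List.foldl_cons]
    rcases List.mem_cons.mp hi with rfl | hi'
    · exact le_trans (fmax_ge hx hq) (le_foldl_fmax _ _ _ _ _)
    · exact ih hi'

theorem foldl_fmax_cases (q : Int → Int → Prop) [∀ i, DecidablePred (q i)]
    (h : Int → Int → Int) (inner : Int → List Int) (l : List Int) (a : Int) :
    l.foldl (fun acc i => fmax (q i) (h i) (inner i) acc) a = a ∨
      ∃ i ∈ l, ∃ x ∈ inner i, q i x ∧
        l.foldl (fun acc i => fmax (q i) (h i) (inner i) acc) a = h i x := by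
  induction l generalizing a with
  | nil => left; rfl
  | cons y ys ih =>
    simp only [List.foldl_cons]
    rcases ih (fmax (q y) (h y) (inner y) a) with heq | ⟨i, hi, x, hx, hq, hval⟩
    · rcases fmax_cases (q y) (h y) (inner y) a with h0 | ⟨x, hx, hq, hv⟩
      · left; rw [heq, h0]
      · right; exact ⟨y, List.mem_cons_self, x, hx, hq, by rw [heq, hv]⟩
    · right; exact ⟨i, List.mem_cons_of_mem _ hi, x, hx, hq, hval⟩

theorem foldl_prod_split (f1 f2 : Int → Int → Int) (l : List Int) (a : Int × Int) :
    l.foldl (fun d j => (f1 d.1 j, f2 d.2 j)) a = (l.foldl f1 a.1, l.foldl f2 a.2) := by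
  induction l generalizing a with
  | nil => rfl
  | cons y ys ih => simp only [List.foldl_cons]; exact ih _

/-- upper-bound property: `r` dominates every differing pair -/
def UB (A : List Int) (r : Int) : Prop :=
  ∀ i j : Int, 0 ≤ i → i ≤ j → j < (A.length : Int) →
    PySem.List.pyGetD A i 0 ≠ PySem.List.pyGetD A j 0 → j - i ≤ r

/-- achievability: `r` is 0 or realised by a differing pair -/
def ACH (A : List Int) (r : Int) : Prop :=
  r = 0 ∨ ∃ i j : Int, 0 ≤ i ∧ i ≤ j ∧ j < (A.length : Int) ∧
    PySem.List.pyGetD A i 0 ≠ PySem.List.pyGetD A j 0 ∧ r = j - i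

theorem portA_eq (A : List Int) :
    solution_unoptimized A =
      (PySem.List.pyRange 0 (A.length : Int) 1).foldl
        (fun acc i => fmax (fun j => PySem.List.pyGetD A i 0 ≠ PySem.List.pyGetD A j 0)
          (fun j => j - i) (PySem.List.pyRange i (A.length : Int) 1) acc) 0 := rfl

theorem portA_nonneg (A : List Int) : 0 ≤ solution_unoptimized A := by
  rw [portA_eq]; exact le_foldl_fmax _ _ _ _ _

theorem portA_UB (A : List Int) : UB A (solution_unoptimized A) := by
  intro i j h0 hij hjN hne
  rw [portA_eq]
  exact foldl_fmax_ge (PySem.List.mem_pyRange_one.mpr ⟨h0, lt_of_le_of_lt hij hjN⟩)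
    (PySem.List.mem_pyRange_one.mpr ⟨hij, hjN⟩) hne

theorem portA_ACH (A : List Int) : ACH A (solution_unoptimized A) := by
  rw [ACH, portA_eq]
  rcases foldl_fmax_cases (fun i j => PySem.List.pyGetD A i 0 ≠ PySem.List.pyGetD A j 0)
      (fun i j => j - i) (fun i => PySem.List.pyRange i (A.length : Int) 1)
      (PySem.List.pyRange 0 (A.length : Int) 1) 0 with h | ⟨i, hi, j, hj, hq, hval⟩
  · left; exact h
  · obtain ⟨hi0, _⟩ := PySem.List.mem_pyRange_one.mp hi
    obtain ⟨hij, hjN⟩ := PySem.List.mem_pyRange_one.mp hj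
    right; exact ⟨i, j, hi0, hij, hjN, hq, hval⟩

theorem portB_eq (A : List Int) (hA : A ≠ []) :
    solution_unoptimized_alt A =
      max (fmax (fun j => PySem.List.pyGetD A j 0 ≠ PySem.List.pyGetD A 0 0) (fun j => j)
            (PySem.List.pyRange 0 (A.length : Int) 1) 0)
          (fmax (fun j => PySem.List.pyGetD A j 0 ≠ PySem.List.pyGetD A ((A.length : Int) - 1) 0)
            (fun j => (A.length : Int) - 1 - j)
            (PySem.List.pyRange 0 (A.length : Int) 1) 0) := by
  simp only [solution_unoptimized_alt, if_neg hA]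
  rw [foldl_prod_split
    (fun acc j => if PySem.List.pyGetD A j 0 ≠ PySem.List.pyGetD A 0 0 then max acc j else acc)
    (fun acc j => if PySem.List.pyGetD A j 0 ≠ PySem.List.pyGetD A ((A.length : Int) - 1) 0
      then max acc ((A.length : Int) - 1 - j) else acc)]
  rfl

theorem portB_nonneg (A : List Int) : 0 ≤ solution_unoptimized_alt A := by
  by_cases hA : A = []
  · rw [solution_unoptimized_alt, if_pos hA]
  · rw [portB_eq A hA]
    exact le_trans (le_fmax _ _ _ _) (le_max_left _ _)

theorem portB_UB (A : List Int) : UB A (solution_unoptimized_alt A) := by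
  intro i j h0 hij hjN hne
  have hA : A ≠ [] := by
    intro h; subst h; simp at hjN; omega
  rw [portB_eq A hA]
  set F1 := fmax (fun j => PySem.List.pyGetD A j 0 ≠ PySem.List.pyGetD A 0 0) (fun j => j)
    (PySem.List.pyRange 0 (A.length : Int) 1) 0 with hF1
  set F2 := fmax (fun j => PySem.List.pyGetD A j 0 ≠ PySem.List.pyGetD A ((A.length : Int) - 1) 0)
    (fun j => (A.length : Int) - 1 - j) (PySem.List.pyRange 0 (A.length : Int) 1) 0 with hF2
  have hm1 : F1 ≤ max F1 F2 := le_max_left _ _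
  have hm2 : F2 ≤ max F1 F2 := le_max_right _ _
  have hjmem : j ∈ PySem.List.pyRange 0 (A.length : Int) 1 :=
    PySem.List.mem_pyRange_one.mpr ⟨le_trans h0 hij, hjN⟩
  have himem : i ∈ PySem.List.pyRange 0 (A.length : Int) 1 :=
    PySem.List.mem_pyRange_one.mpr ⟨h0, lt_of_le_of_lt hij hjN⟩
  by_cases hj0 : PySem.List.pyGetD A j 0 = PySem.List.pyGetD A 0 0
  · by_cases hil : PySem.List.pyGetD A i 0 = PySem.List.pyGetD A ((A.length : Int) - 1) 0
    · have hlast : PySem.List.pyGetD A ((A.length : Int) - 1) 0 ≠ PySem.List.pyGetD A 0 0 := by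
        rw [← hil, ← hj0]; exact hne
      have hmem : (A.length : Int) - 1 ∈ PySem.List.pyRange 0 (A.length : Int) 1 :=
        PySem.List.mem_pyRange_one.mpr ⟨by omega, by omega⟩
      have h1 := fmax_ge (p := fun j => PySem.List.pyGetD A j 0 ≠ PySem.List.pyGetD A 0 0)
        (g := fun j => j) (a := 0) hmem hlast
      rw [← hF1] at h1
      simp only at h1
      omega
    · have h1 := fmax_ge
        (p := fun j => PySem.List.pyGetD A j 0 ≠ PySem.List.pyGetD A ((A.length : Int) - 1) 0)
        (g := fun j => (A.length : Int) - 1 - j) (a := 0) himem hil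
      rw [← hF2] at h1
      simp only at h1
      omega
  · have h1 := fmax_ge (p := fun j => PySem.List.pyGetD A j 0 ≠ PySem.List.pyGetD A 0 0)
      (g := fun j => j) (a := 0) hjmem hj0
    rw [← hF1] at h1
    simp only at h1
    omega

theorem portB_ACH (A : List Int) : ACH A (solution_unoptimized_alt A) := by
  by_cases hA : A = []
  · left; rw [solution_unoptimized_alt, if_pos hA]
  · have hN : 0 < (A.length : Int) := by
      have := List.length_pos_iff.mpr hA
      omega
    rw [ACH, portB_eq A hA]
    rcases max_choice
        (fmax (fun j => PySem.List.pyGetD A j 0 ≠ PySem.List.pyGetD A 0 0) (fun j => j)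
          (PySem.List.pyRange 0 (A.length : Int) 1) 0)
        (fmax (fun j => PySem.List.pyGetD A j 0 ≠ PySem.List.pyGetD A ((A.length : Int) - 1) 0)
          (fun j => (A.length : Int) - 1 - j)
          (PySem.List.pyRange 0 (A.length : Int) 1) 0) with hm | hm <;> rw [hm]
    · rcases fmax_cases (fun j => PySem.List.pyGetD A j 0 ≠ PySem.List.pyGetD A 0 0) (fun j => j)
          (PySem.List.pyRange 0 (A.length : Int) 1) 0 with h | ⟨j, hj, hq, hv⟩
      · left; exact h
      · obtain ⟨hj0, hjN⟩ := PySem.List.mem_pyRange_one.mp hj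
        right; exact ⟨0, j, le_refl 0, hj0, hjN, Ne.symm hq, by omega⟩
    · rcases fmax_cases
          (fun j => PySem.List.pyGetD A j 0 ≠ PySem.List.pyGetD A ((A.length : Int) - 1) 0)
          (fun j => (A.length : Int) - 1 - j)
          (PySem.List.pyRange 0 (A.length : Int) 1) 0 with h | ⟨i, hi, hq, hv⟩
      · left; exact h
      · obtain ⟨hi0, hiN⟩ := PySem.List.mem_pyRange_one.mp hi
        right; exact ⟨i, (A.length : Int) - 1, hi0, by omega, by omega, hq, hv⟩

-- ===== VERDICT (by name: the statement is the Claim_ definition above) =====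
theorem solution_unoptimized_spec : Claim_equal_solution_unoptimized := by
  intro A _
  unfold Spec_solution_unoptimized
  apply le_antisymm
  · rcases portA_ACH A with h | ⟨i, j, h0, hij, hjN, hne, hval⟩
    · rw [h]; exact portB_nonneg A
    · rw [hval]; exact portB_UB A i j h0 hij hjN hne
  · rcases portB_ACH A with h | ⟨i, j, h0, hij, hjN, hne, hval⟩
    · rw [h]; exact portA_nonneg A
    · rw [hval]; exact portA_UB A i j h0 hij hjN hne
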